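-- pv_equiv track=rewrite | github.com/AI-Driven-Document-Analysis-System/document-analyzer | app/services/ocr_service.py | _reconstruct_sentences
-- ===== SOURCE A (Python) =====
-- def _reconstruct_sentences(text: str) -> str:
--     """
--     Reconstruct proper sentences from word-per-line OCR format.
--
--     Args:
--         text: Raw OCR text with potential word-per-line format
--
--     Returns:
--         Text with reconstructed sentences
--     """
--     if not text:
--         return ""
--
--     lines = text.split('\n')
--     reconstructed_lines = []
--     current_sentence = []
--
--     for line in lines:
--         line = line.strip()
--         if not line:
--             continue
--
--         # If line is a single word or very short, likely part of fragmented sentence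
--         if len(line.split()) <= 2 and len(line) < 20:
--             current_sentence.append(line)
--         else:
--             # Complete sentence or paragraph
--             if current_sentence:
--                 # Join accumulated words and add to result
--                 reconstructed_lines.append(' '.join(current_sentence))
--                 current_sentence = []
--             reconstructed_lines.append(line)
--
--     # Add any remaining accumulated words
--     if current_sentence:
--         reconstructed_lines.append(' '.join(current_sentence))
--
--     return '\n'.join(reconstructed_lines)
-- ===== SOURCE B (Python) =====
-- def _short(line):
--     return len(line.split()) <= 2 and len(line) < 20
--
--
-- def _reconstruct_sentences(text: str) -> str:
--     if not text:
--         return ""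
--     lines = [s for s in (raw.strip() for raw in text.split('\n')) if s]
--     out = []
--     i = 0
--     n = len(lines)
--     while i < n:
--         if _short(lines[i]):
--             j = i + 1
--             while j < n and _short(lines[j]):
--                 j += 1
--             out.append(' '.join(lines[i:j]))
--             i = j
--         else:
--             out.append(lines[i])
--             i += 1
--     return '\n'.join(out)
-- ===== Notes on version B (the rewrite author's own statement) =====
-- stated objective: alternative
-- what changed: Replaces A's single-pass flush-on-long-line accumulator with a two-phase decomposition: first strip and drop empty lines, then scan runs of consecutive short lines with an index loop, joining each run as one slice.
import Mathlib
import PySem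

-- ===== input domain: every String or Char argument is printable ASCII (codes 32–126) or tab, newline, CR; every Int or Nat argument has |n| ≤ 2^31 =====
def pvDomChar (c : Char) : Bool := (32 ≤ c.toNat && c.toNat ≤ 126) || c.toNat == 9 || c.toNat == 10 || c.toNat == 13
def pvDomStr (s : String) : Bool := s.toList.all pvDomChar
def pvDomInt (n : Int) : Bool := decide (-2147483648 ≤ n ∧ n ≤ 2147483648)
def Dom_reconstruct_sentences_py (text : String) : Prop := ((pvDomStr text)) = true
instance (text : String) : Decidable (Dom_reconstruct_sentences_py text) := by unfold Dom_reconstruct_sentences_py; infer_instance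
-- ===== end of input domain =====

-- B replaces A's flush-on-long-line accumulator by a two-phase decomposition (strip/filter first,
-- then join maximal runs of short lines found by an index scan); alternative, same cost.

-- text.split('\n') (sep is the non-empty literal "\n", so Python never raises; split? is always `some` here)
def pvLines (text : String) : List String := (PySem.Str.split? text "\n").getD []

-- the short-line predicate `len(line.split()) <= 2 and len(line) < 20` (used verbatim by both Pythons)
def pvShort (line : String) : Bool :=
  decide ((PySem.Str.split₀ line).length ≤ 2) && decide (PySem.Str.len line < 20)

-- ===== PORT A =====
def reconstruct_sentences_py (text : String) : String :=
  if text = "" then ""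
  else
    let lines := pvLines text
    let st := lines.foldl (fun (st : List String × List String) rawLine =>
      let line := PySem.Str.strip rawLine
      if line = "" then st
      else if pvShort line then (st.1, st.2 ++ [line])
      else
        let out1 := if st.2 = [] then st.1 else st.1 ++ [PySem.Str.join " " st.2]
        (out1 ++ [line], [])) ([], [])
    let final := if st.2 = [] then st.1 else st.1 ++ [PySem.Str.join " " st.2]
    PySem.Str.join "\n" final

-- ===== PORT B =====
-- inner while loop: collect the run of consecutive short lines and the remainder
def pvSpanShort : List String → List String × List String
  | [] => ([], [])
  | x :: xs =>
    if pvShort x then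
      let p := pvSpanShort xs
      (x :: p.1, p.2)
    else ([], x :: xs)

theorem pvSpanShort_snd_len : ∀ (xs : List String), (pvSpanShort xs).2.length ≤ xs.length := by
  intro xs
  induction xs with
  | nil => simp [pvSpanShort]
  | cons x xs ih =>
    simp only [pvSpanShort]
    split
    · exact Nat.le_succ_of_le ih
    · simp

-- outer while loop over the filtered lines
def pvGo : List String → List String
  | [] => []
  | x :: xs =>
    if pvShort x then
      let p := pvSpanShort xs
      PySem.Str.join " " (x :: p.1) :: pvGo p.2
    else x :: pvGo xs
termination_by xs => xs.length
decreasing_by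
  · exact Nat.lt_succ_of_le (pvSpanShort_snd_len xs)
  · simp

def reconstruct_sentences_py_alt (text : String) : String :=
  if text = "" then ""
  else
    let lines := ((pvLines text).map PySem.Str.strip).filter (· ≠ "")
    PySem.Str.join "\n" (pvGo lines)

-- ===== PRECONDITION & SPEC =====
def Spec_reconstruct_sentences_py (text : String) (out : String) : Prop := out = reconstruct_sentences_py_alt text
instance (text : String) (out : String) : Decidable (Spec_reconstruct_sentences_py text out) := by unfold Spec_reconstruct_sentences_py; infer_instance

-- ===== CLAIM (what is proved, stated in full; the proofs are below) =====
def Claim_equal_reconstruct_sentences_py : Prop := ∀ (text : String), Dom_reconstruct_sentences_py text → Spec_reconstruct_sentences_py text (reconstruct_sentences_py text)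

-- ===== LEMMAS AND PROOFS =====

-- A's loop body once the line is stripped and known non-empty
def pvStepB (st : List String × List String) (line : String) : List String × List String :=
  if pvShort line then (st.1, st.2 ++ [line])
  else
    let out1 := if st.2 = [] then st.1 else st.1 ++ [PySem.Str.join " " st.2]
    (out1 ++ [line], [])

def pvFin (st : List String × List String) : List String :=
  if st.2 = [] then st.1 else st.1 ++ [PySem.Str.join " " st.2]

-- what A produces, as a function of the pending run `cur` and the remaining filtered lines
def pvA' : List String → List String → List String
  | cur, [] => if cur = [] then [] else [PySem.Str.join " " cur]
  | cur, l :: ls =>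
    if pvShort l then pvA' (cur ++ [l]) ls
    else (if cur = [] then [] else [PySem.Str.join " " cur]) ++ l :: pvA' [] ls
termination_by _ ls => ls.length

theorem pv_fold_filter (lines : List String) (st : List String × List String) :
    lines.foldl (fun (st : List String × List String) rawLine =>
      let line := PySem.Str.strip rawLine
      if line = "" then st
      else if pvShort line then (st.1, st.2 ++ [line])
      else
        let out1 := if st.2 = [] then st.1 else st.1 ++ [PySem.Str.join " " st.2]
        (out1 ++ [line], [])) st
    = ((lines.map PySem.Str.strip).filter (· ≠ "")).foldl pvStepB st := by
  induction lines generalizing st with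
  | nil => rfl
  | cons r rs ih =>
    simp only [List.foldl, List.map, List.filter]
    by_cases h : PySem.Str.strip r = ""
    · simp [h, ih]
    · simp [h, ih, pvStepB]

theorem pv_fold_A' (L : List String) (out cur : List String) :
    pvFin (L.foldl pvStepB (out, cur)) = out ++ pvA' cur L := by
  induction L generalizing out cur with
  | nil => simp [pvFin, pvA']; split <;> simp
  | cons l ls ih =>
    simp only [List.foldl, pvStepB, pvA']
    by_cases h : pvShort l
    · simp [h, ih]
    · by_cases hc : cur = [] <;> simp [h, hc, ih]

theorem pvSpanShort_eq (xs : List String) :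
    pvSpanShort xs = (xs.takeWhile pvShort, xs.dropWhile pvShort) := by
  induction xs with
  | nil => rfl
  | cons x xs ih =>
    simp only [pvSpanShort, List.takeWhile, List.dropWhile]
    by_cases h : pvShort x <;> simp [h, ih]

theorem pvA'_run : ∀ (r : List String), (∀ x ∈ r, pvShort x) → ∀ cur rest,
    pvA' cur (r ++ rest) = pvA' (cur ++ r) rest := by
  intro r
  induction r with
  | nil => intro _ cur rest; simp
  | cons x t ih =>
    intro h cur rest
    have hx : pvShort x := h x (by simp)
    simp only [List.cons_append, pvA', hx, if_true]
    rw [ih (fun y hy => h y (by simp [hy])) (cur ++ [x]) rest]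
    simp

theorem pv_dropWhile_head (p : String → Bool) : ∀ (xs : List String) (l : String) (ls : List String),
    xs.dropWhile p = l :: ls → p l = false := by
  intro xs
  induction xs with
  | nil => intro l ls h; simp [List.dropWhile] at h
  | cons x t ih =>
    intro l ls h
    by_cases hx : p x
    · exact ih l ls (by simpa [List.dropWhile, hx] using h)
    · simp [List.dropWhile, hx] at h
      simp [← h.1, hx]

theorem pvA'_go (n : ℕ) : ∀ (L : List String), L.length ≤ n → pvA' [] L = pvGo L := by
  induction n with
  | zero => intro L hL; rw [List.length_eq_zero_iff.mp (Nat.le_zero.mp hL)]; simp [pvA', pvGo]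
  | succ n ih =>
    intro L hL
    match L with
    | [] => simp [pvA', pvGo]
    | x :: xs =>
      by_cases hx : pvShort x
      · have hsplit := pvSpanShort_eq xs
        have hjoin : xs.takeWhile pvShort ++ xs.dropWhile pvShort = xs := List.takeWhile_append_dropWhile
        have hall : ∀ y ∈ xs.takeWhile pvShort, pvShort y := fun y hy => List.mem_takeWhile_imp hy
        have h1 : pvA' [] (x :: xs) = pvA' [x] xs := by
          simp [pvA', hx]
        have hgo : pvGo (x :: xs) = PySem.Str.join " " (x :: (pvSpanShort xs).1) :: pvGo (pvSpanShort xs).2 := by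
          rw [pvGo]; simp [hx]
        rw [hgo, hsplit, h1]
        conv_lhs => rw [← hjoin]
        rw [pvA'_run _ hall]
        match hrest : xs.dropWhile pvShort with
        | [] => simp [pvA', pvGo]
        | l :: ls =>
          have hl : ¬ pvShort l := by
            have := pv_dropWhile_head pvShort xs l ls hrest
            simp [this]
          have hls : ls.length ≤ n := by
            have h2 : (xs.dropWhile pvShort).length ≤ xs.length := List.length_dropWhile_le _ _
            rw [hrest] at h2
            simp only [List.length_cons] at h2 hL
            omega
          simp only [pvA', hl]
          have hgol : pvGo (l :: ls) = l :: pvGo ls := by rw [pvGo]; simp [hl]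
          rw [hgol, ih ls hls]
          simp
      · have hxs : xs.length ≤ n := by simp at hL; omega
        simp only [pvA', hx]
        rw [pvGo]
        simp [hx, ih xs hxs]

-- ===== VERDICT (by name: the statement is the Claim_ definition above) =====
theorem reconstruct_sentences_py_spec : Claim_equal_reconstruct_sentences_py := by
  intro text _
  simp only [Spec_reconstruct_sentences_py, reconstruct_sentences_py, reconstruct_sentences_py_alt]
  by_cases h : text = ""
  · simp [h]
  · simp only [h, if_false]
    rw [pv_fold_filter]
    have h2 := pv_fold_A' (((pvLines text).map PySem.Str.strip).filter (· ≠ "")) [] []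
    simp only [List.nil_append] at h2
    unfold pvFin at h2
    rw [h2, pvA'_go (((pvLines text).map PySem.Str.strip).filter (· ≠ "")).length _ (le_refl _)]
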